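-- pv_equiv track=rewrite | github.com/humin09/agent | maas/maas_test.py | upsert_cli_arg
-- ===== SOURCE A (Python) =====
-- from typing import Any, Dict, List, Optional, Sequence
--
-- def upsert_cli_arg(existing_args: List[str], flag: str, value: str) -> List[str]:
--     updated = list(existing_args)
--     for idx, arg in enumerate(updated):
--         if arg == flag:
--             if idx + 1 < len(updated):
--                 updated[idx + 1] = value
--             else:
--                 updated.append(value)
--             return updated
--         if arg.startswith(f"{flag}="):
--             updated[idx] = f"{flag}={value}"
--             return updated
--     updated.extend([flag, value])
--     return updated
-- ===== SOURCE B (Python) =====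
-- def upsert_cli_arg(existing_args, flag, value):
--     # Split the list at the first matching argument, then reassemble by
--     # concatenating list segments (no in-place index mutation).
--     prefix = flag + "="
--     head = []
--     tail = list(existing_args)
--     while tail and tail[0] != flag and not tail[0].startswith(prefix):
--         head.append(tail.pop(0))
--     if not tail:
--         return head + [flag, value]
--     if tail[0] == flag:
--         return head + [flag, value] + tail[2:]
--     return head + [prefix + value] + tail[1:]
-- ===== Notes on version B (the rewrite author's own statement) =====
-- stated objective: alternative
-- what changed: B splits the list at the first matching argument into head/tail segments (a while loop moving items from tail to head) and reassembles the result by list concatenation, eliminating A's in-place index assignments and the idx+1<len append-vs-overwrite branch (both flag cases become one concatenation shape); the pop(0)-based split makes B quadratic in Python.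
import Mathlib
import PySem

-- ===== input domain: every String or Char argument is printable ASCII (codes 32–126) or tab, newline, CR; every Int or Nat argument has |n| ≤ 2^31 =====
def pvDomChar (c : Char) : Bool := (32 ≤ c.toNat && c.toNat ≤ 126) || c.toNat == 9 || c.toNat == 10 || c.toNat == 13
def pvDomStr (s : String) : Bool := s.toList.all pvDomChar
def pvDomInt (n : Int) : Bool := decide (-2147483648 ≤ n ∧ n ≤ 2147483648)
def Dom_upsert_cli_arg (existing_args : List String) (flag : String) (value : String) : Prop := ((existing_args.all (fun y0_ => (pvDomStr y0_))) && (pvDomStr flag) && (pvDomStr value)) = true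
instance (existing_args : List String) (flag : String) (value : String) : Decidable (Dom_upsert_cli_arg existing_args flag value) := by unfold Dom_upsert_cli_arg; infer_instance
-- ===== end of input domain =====

-- B splits the list at the first matching argument and reassembles by concatenation,
-- replacing A's in-place index mutation inside the scan (objective: alternative).


-- ===== PORT A =====
-- A's for-loop with early returns, rendered as structural recursion over the list:
-- the head plays 'arg'; 'updated[idx+1] = value' replaces the head of the tail,
-- 'append' is the empty-tail case, and falling off the loop extends with [flag, value].
def upsertLoopA (flag : String) (value : String) : List String → List String
  | [] => [flag, value]
  | a :: rest =>
    if a == flag then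
      match rest with
      | [] => [a, value]
      | _ :: rest' => a :: value :: rest'
    else if PySem.Str.startswith a (flag ++ "=") then
      (flag ++ "=" ++ value) :: rest
    else
      a :: upsertLoopA flag value rest

def upsert_cli_arg (existing_args : List String) (flag : String) (value : String) : List String :=
  upsertLoopA flag value existing_args

-- ===== PORT B =====
-- B's while loop moving non-matching items from 'tail' to 'head', then reassembling
-- head / replacement segment / remaining tail by concatenation.
def upsertSplitB (flag : String) (pfx : String) (value : String)
    (head : List String) : List String → List String
  | [] => head ++ [flag, value]
  | hit :: rest =>
    if hit != flag && !(PySem.Str.startswith hit pfx) then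
      upsertSplitB flag pfx value (head ++ [hit]) rest
    else if hit == flag then
      head ++ [flag, value] ++ rest.drop 1
    else
      head ++ [pfx ++ value] ++ rest

def upsert_cli_arg_alt (existing_args : List String) (flag : String) (value : String) : List String :=
  upsertSplitB flag (flag ++ "=") value [] existing_args

-- ===== PRECONDITION & SPEC =====
def Spec_upsert_cli_arg (existing_args : List String) (flag : String) (value : String) (out : List String) : Prop := out = upsert_cli_arg_alt existing_args flag value
instance (existing_args : List String) (flag : String) (value : String) (out : List String) : Decidable (Spec_upsert_cli_arg existing_args flag value out) := by unfold Spec_upsert_cli_arg; infer_instance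

-- ===== CLAIM (what is proved, stated in full; the proofs are below) =====
def Claim_equal_upsert_cli_arg : Prop := ∀ (existing_args : List String) (flag : String) (value : String), Dom_upsert_cli_arg existing_args flag value → Spec_upsert_cli_arg existing_args flag value (upsert_cli_arg existing_args flag value)

-- ===== LEMMAS AND PROOFS =====
theorem upsertSplitB_eq (flag value : String) (l head : List String) :
    upsertSplitB flag (flag ++ "=") value head l = head ++ upsertLoopA flag value l := by
  induction l generalizing head with
  | nil => simp [upsertSplitB, upsertLoopA]
  | cons a rest ih =>
    by_cases h1 : a == flag
    · have ha : a = flag := eq_of_beq h1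
      cases rest with
      | nil => simp [upsertSplitB, upsertLoopA, ha]
      | cons b rest' => simp [upsertSplitB, upsertLoopA, ha]
    · by_cases h2 : PySem.Str.startswith a (flag ++ "=")
      · simp at h2
        simp [upsertSplitB, upsertLoopA, h1, h2]
      · simp at h1 h2
        simp [upsertSplitB, upsertLoopA, h1, h2, ih]

-- ===== VERDICT (by name: the statement is the Claim_ definition above) =====
theorem upsert_cli_arg_spec : Claim_equal_upsert_cli_arg := by
  intro existing_args flag value _
  unfold Spec_upsert_cli_arg upsert_cli_arg upsert_cli_arg_alt
  simp [upsertSplitB_eq]
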